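-- pv_equiv track=rewrite | github.com/Sanchit-100/Assembler_Simulator | sim_test2.py | sign_extend
-- ===== SOURCE A (Python) =====
-- def sign_extend(binary_str, bits):
--     if len(binary_str) >= bits:
--         return binary_str
--     else:
--         sign = binary_str[0]
--         while len(binary_str) < bits:
--             binary_str = sign + binary_str
--         return binary_str
-- ===== SOURCE B (Python) =====
-- def sign_extend(binary_str, bits):
--     if len(binary_str) >= bits:
--         return binary_str
--     sign = binary_str[0]
--     return sign * (bits - len(binary_str)) + binary_str
-- ===== Notes on version B (the rewrite author's own statement) =====
-- stated objective: simpler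
-- what changed: Replaces the one-character-at-a-time while loop with a closed-form build: compute the missing length and prepend sign * (bits - len) in one string multiplication.
import Mathlib
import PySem

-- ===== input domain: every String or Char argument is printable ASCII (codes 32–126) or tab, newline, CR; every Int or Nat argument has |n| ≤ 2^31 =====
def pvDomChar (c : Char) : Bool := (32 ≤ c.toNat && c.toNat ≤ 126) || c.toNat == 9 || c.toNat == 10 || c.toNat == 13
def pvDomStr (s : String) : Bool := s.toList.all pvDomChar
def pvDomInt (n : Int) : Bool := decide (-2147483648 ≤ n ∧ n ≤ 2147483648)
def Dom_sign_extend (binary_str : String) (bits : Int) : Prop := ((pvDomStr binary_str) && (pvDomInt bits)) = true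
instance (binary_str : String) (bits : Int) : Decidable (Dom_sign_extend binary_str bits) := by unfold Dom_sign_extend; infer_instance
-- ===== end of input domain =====

-- B replaces A's character-at-a-time prepend loop with a closed-form replicate-and-append (simpler).

-- ===== PORT A =====
-- the while loop: prepend sign while the length is below bits
def padLoopA (sign : Char) (s : List Char) (bits : Int) : List Char :=
  if (s.length : Int) < bits then padLoopA sign (sign :: s) bits else s
termination_by (bits - s.length).toNat
decreasing_by simp; omega

def sign_extend (binary_str : String) (bits : Int) : String :=
  if PySem.Str.len binary_str ≥ bits then binary_str
  else
    match PySem.Str.pyGet? binary_str 0 with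
    | none => ""  -- IndexError in Python (empty string); excluded by Pre_
    | some sign => String.ofList (padLoopA sign binary_str.toList bits)

-- ===== PORT B =====
def sign_extend_alt (binary_str : String) (bits : Int) : String :=
  if PySem.Str.len binary_str ≥ bits then binary_str
  else
    match PySem.Str.pyGet? binary_str 0 with
    | none => ""  -- IndexError in Python (empty string); excluded by Pre_
    | some sign =>
        String.ofList (List.replicate (bits - PySem.Str.len binary_str).toNat sign ++ binary_str.toList)

-- ===== PRECONDITION & SPEC =====
-- A (and B) raise IndexError exactly when the string is empty and bits > 0; Pre_ excludes precisely those inputs.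
def Pre_sign_extend (binary_str : String) (bits : Int) : Prop := ¬ (binary_str = "" ∧ 0 < bits)
instance (binary_str : String) (bits : Int) : Decidable (Pre_sign_extend binary_str bits) := by unfold Pre_sign_extend; infer_instance
def pvWitness_sign_extend : String × Int := ("10", 5)

def Spec_sign_extend (binary_str : String) (bits : Int) (out : String) : Prop := out = sign_extend_alt binary_str bits
instance (binary_str : String) (bits : Int) (out : String) : Decidable (Spec_sign_extend binary_str bits out) := by unfold Spec_sign_extend; infer_instance

-- ===== CLAIM (what is proved, stated in full; the proofs are below) =====
def Claim_equal_sign_extend : Prop := ∀ (binary_str : String) (bits : Int), Dom_sign_extend binary_str bits → Pre_sign_extend binary_str bits → Spec_sign_extend binary_str bits (sign_extend binary_str bits)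

-- ===== LEMMAS AND PROOFS =====
lemma padLoopA_eq (sign : Char) (bits : Int) :
    ∀ (n : Nat) (s : List Char), (bits - s.length).toNat = n →
      padLoopA sign s bits = List.replicate n sign ++ s := by
  intro n
  induction n with
  | zero =>
      intro s h
      rw [padLoopA]
      have : ¬ ((s.length : Int) < bits) := by omega
      simp [this]
  | succ k ih =>
      intro s h
      have hlt : (s.length : Int) < bits := by omega
      rw [padLoopA]
      simp only [hlt, if_pos]
      rw [ih (sign :: s) (by simp; omega)]
      rw [List.replicate_succ']
      simp

-- ===== VERDICT (by name: the statement is the Claim_ definition above) =====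
theorem sign_extend_spec : Claim_equal_sign_extend := by
  intro s bits _ _
  unfold Spec_sign_extend sign_extend sign_extend_alt
  by_cases hge : PySem.Str.len s ≥ bits
  · rw [if_pos hge, if_pos hge]
  · rw [if_neg hge, if_neg hge]
    cases hget : PySem.Str.pyGet? s 0 with
    | none => rfl
    | some sign =>
        dsimp only
        rw [padLoopA_eq sign bits (bits - PySem.Str.len s).toNat s.toList
          (by simp [PySem.Str.len_eq])]
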